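-- pv_equiv track=rewrite | github.com/Jerzy9/AlgorithmsAndDataStructure | kolos/kolos1.py | sortowanie_przez_zliczanie
-- ===== SOURCE A (Python) =====
-- def sortowanie_przez_zliczanie(tab, A):
--     indexy = [0] * len(A)
--     res = []
--
--     for i in tab:
--         index = A.index(i)
--         indexy[index] += 1
--
--     for i in range(0, len(A)):
--         for j in range(0, indexy[i]):
--             res.append(A[i])
--     return res
-- ===== SOURCE B (Python) =====
-- def sortowanie_przez_zliczanie(tab, A):
--     return sorted(tab, key=A.index)
-- ===== Notes on version B (the rewrite author's own statement) =====
-- stated objective: simpler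
-- what changed: Replaces the hand-built count array and double expansion loop with a one-line stable comparison sort keyed by each element's position in A.
import Mathlib
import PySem

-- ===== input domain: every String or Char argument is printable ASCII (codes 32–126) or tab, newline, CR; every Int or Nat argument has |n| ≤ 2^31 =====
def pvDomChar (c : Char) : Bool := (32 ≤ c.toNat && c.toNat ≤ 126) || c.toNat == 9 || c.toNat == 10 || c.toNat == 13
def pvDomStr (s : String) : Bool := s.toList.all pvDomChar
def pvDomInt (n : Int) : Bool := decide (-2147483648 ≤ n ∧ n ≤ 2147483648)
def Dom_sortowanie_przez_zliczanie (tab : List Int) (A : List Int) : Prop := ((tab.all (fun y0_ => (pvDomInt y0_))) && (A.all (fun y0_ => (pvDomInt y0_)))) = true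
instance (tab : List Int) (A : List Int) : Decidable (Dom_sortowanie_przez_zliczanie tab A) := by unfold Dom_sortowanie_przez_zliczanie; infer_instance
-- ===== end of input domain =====

-- B replaces A's counting-sort table build by a stable sort keyed by position in A ('simpler').


-- ===== PORT A =====
-- 'index = A.index(i)': Python raises ValueError when i ∉ A; the 'none' branch is excluded by Pre_.
def sortowanie_przez_zliczanie (tab : List Int) (A : List Int) : List Int :=
  let indexy := tab.foldl (fun ind i =>
      match PySem.List.index? A i with
      | some k => ind.set k (ind.getD k 0 + 1)
      | none => ind) (List.replicate A.length (0 : Int))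
  (PySem.List.pyRange 0 (A.length : Int) 1).foldl (fun res i =>
     (PySem.List.pyRange 0 (PySem.List.pyGetD indexy i 0) 1).foldl
       (fun r _ => r ++ [PySem.List.pyGetD A i 0]) res) []

-- ===== PORT B =====
-- 'sorted(tab, key=A.index)': the key raises ValueError when x ∉ A (excluded by Pre_); getD 0 there.
def sortowanie_przez_zliczanie_alt (tab : List Int) (A : List Int) : List Int :=
  PySem.List.sorted tab (fun x => (PySem.List.index? A x).getD 0) false

-- ===== PRECONDITION & SPEC =====
-- Pre_ excludes exactly the inputs where some element of tab is missing from A: there A.index raises ValueError (in both A and B).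
def Pre_sortowanie_przez_zliczanie (tab : List Int) (A : List Int) : Prop := ∀ x ∈ tab, x ∈ A
instance (tab : List Int) (A : List Int) : Decidable (Pre_sortowanie_przez_zliczanie tab A) := by unfold Pre_sortowanie_przez_zliczanie; infer_instance
def pvWitness_sortowanie_przez_zliczanie : List Int × List Int := ([2, 1, 2, 1, 1], [1, 2])
def Spec_sortowanie_przez_zliczanie (tab : List Int) (A : List Int) (out : List Int) : Prop := out = sortowanie_przez_zliczanie_alt tab A
instance (tab : List Int) (A : List Int) (out : List Int) : Decidable (Spec_sortowanie_przez_zliczanie tab A out) := by unfold Spec_sortowanie_przez_zliczanie; infer_instance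

-- ===== CLAIM (what is proved, stated in full; the proofs are below) =====
def Claim_equal_sortowanie_przez_zliczanie : Prop := ∀ (tab : List Int) (A : List Int), Dom_sortowanie_przez_zliczanie tab A → Pre_sortowanie_przez_zliczanie tab A → Spec_sortowanie_przez_zliczanie tab A (sortowanie_przez_zliczanie tab A)

-- ===== LEMMAS AND PROOFS =====
-- first index of x in A (the value of A.index(x) on both sides)
def pvKey (A : List Int) (x : Int) : Nat := (PySem.List.index? A x).getD 0
-- number of elements of tab whose first index in A is k
def pvCnt (tab A : List Int) (k : Nat) : Nat := tab.countP (fun x => pvKey A x == k)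
-- the multiset of keys of tab, listed in increasing key order
def pvFlat (tab A : List Int) : List Nat :=
  (List.range A.length).flatMap (fun k => List.replicate (pvCnt tab A k) k)


theorem pvKey_facts (A : List Int) (x : Int) (hx : x ∈ A) :
    PySem.List.index? A x = some (pvKey A x) ∧ pvKey A x < A.length ∧ A.getD (pvKey A x) 0 = x := by
  have hs : (PySem.List.index? A x).isSome = true := (PySem.List.index?_isSome_iff A x).mpr hx
  obtain ⟨k, hk⟩ := Option.isSome_iff_exists.mp hs
  have hkey : pvKey A x = k := by unfold pvKey; rw [hk]; rfl
  obtain ⟨hlt, hval, -⟩ := PySem.List.getElem_of_index?_eq_some hk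
  refine ⟨by rw [hkey]; exact hk, by omega, ?_⟩
  rw [hkey, List.getD_eq_getElem?_getD, List.getElem?_eq_getElem hlt]
  simp [hval]

theorem pv_foldl_app {β : Type} (l : List β) (v : Int) (res : List Int) :
    l.foldl (fun r _ => r ++ [v]) res = res ++ List.replicate l.length v := by
  induction l generalizing res with
  | nil => simp
  | cons x t ih => simp [ih, List.replicate_succ]

theorem pv_counts (A : List Int) (l : List Int) (h : ∀ x ∈ l, x ∈ A) :
    ∀ ind : List Int, ind.length = A.length →
      (l.foldl (fun ind i =>
          match PySem.List.index? A i with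
          | some k => ind.set k (ind.getD k 0 + 1)
          | none => ind) ind).length = A.length ∧
      ∀ k : Nat, (l.foldl (fun ind i =>
          match PySem.List.index? A i with
          | some k => ind.set k (ind.getD k 0 + 1)
          | none => ind) ind).getD k 0
        = ind.getD k 0 + (l.countP (fun x => pvKey A x == k) : Int) := by
  induction l with
  | nil => intro ind hlen; simp [hlen]
  | cons x t ih =>
    intro ind hlen
    have hx : x ∈ A := h x (by simp)
    obtain ⟨hidx, hlt, -⟩ := pvKey_facts A x hx
    obtain ⟨ihlen, ihgd⟩ := ih (fun y hy => h y (by simp [hy]))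
      (ind.set (pvKey A x) (ind.getD (pvKey A x) 0 + 1)) (by simp [hlen])
    have hset : ∀ k : Nat, (ind.set (pvKey A x) (ind.getD (pvKey A x) 0 + 1)).getD k 0
        = if pvKey A x = k then ind.getD k 0 + 1 else ind.getD k 0 := by
      intro k
      by_cases h1 : pvKey A x = k
      · subst h1
        simp only [List.getD_eq_getElem?_getD, List.getElem?_set,
          if_pos (show pvKey A x < ind.length by omega)]
        rfl
      · simp only [List.getD_eq_getElem?_getD, List.getElem?_set, if_neg h1]
    constructor
    · simp only [List.foldl_cons, hidx]
      exact ihlen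
    · intro k
      simp only [List.foldl_cons, hidx]
      rw [ihgd k, hset k, List.countP_cons]
      by_cases he : pvKey A x = k <;> simp [he] <;> omega

theorem pv_portA_eq (tab A : List Int) (h : Pre_sortowanie_przez_zliczanie tab A) :
    sortowanie_przez_zliczanie tab A
      = (List.range A.length).flatMap (fun k => List.replicate (pvCnt tab A k) (A.getD k 0)) := by
  unfold sortowanie_przez_zliczanie
  obtain ⟨hlen, hgd⟩ := pv_counts A tab h (List.replicate A.length 0) (by simp)
  set indexy := tab.foldl (fun ind i =>
      match PySem.List.index? A i with
      | some k => ind.set k (ind.getD k 0 + 1)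
      | none => ind) (List.replicate A.length (0 : Int)) with hind
  have hcnt : ∀ k : Nat, indexy.getD k 0 = (pvCnt tab A k : Int) := by
    intro k
    rw [hgd k]
    have : (List.replicate A.length (0:Int)).getD k 0 = 0 := by
      rw [List.getD_eq_getElem?_getD, List.getElem?_replicate]
      split <;> rfl
    rw [this, pvCnt]; ring
  rw [PySem.List.pyRange_zero_nat, List.foldl_map]
  have hstep : (fun (res : List Int) (k : Nat) =>
        (PySem.List.pyRange 0 (PySem.List.pyGetD indexy (↑k) 0)).foldl
          (fun r _ => r ++ [PySem.List.pyGetD A (↑k) 0]) res)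
      = fun res k => res ++ List.replicate (indexy.getD k 0).toNat (A.getD k 0) := by
    funext res k
    rw [pv_foldl_app, PySem.List.length_pyRange_one]
    simp [PySem.List.pyGetD_natCast]
  rw [hstep, PySem.List.foldl_append_eq_flatMap]
  simp only [List.nil_append]
  refine List.flatMap_congr (fun k _ => ?_)
  rw [hcnt k]
  simp

theorem pv_count_flat (c : Nat → Nat) (a : Nat) :
    ∀ n : Nat, ((List.range n).flatMap (fun k => List.replicate (c k) k)).count a
      = if a < n then c a else 0 := by
  intro n
  induction n with
  | zero => simp
  | succ m ih =>
    rw [List.range_succ, List.flatMap_append, List.count_append, ih]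
    simp only [List.flatMap_cons, List.flatMap_nil, List.append_nil, List.count_replicate]
    by_cases h1 : a < m <;> by_cases h2 : m = a <;> simp [h1, h2] <;> omega

theorem pv_mem_flat (c : Nat → Nat) (n : Nat) (x : Nat)
    (hx : x ∈ (List.range n).flatMap (fun k => List.replicate (c k) k)) : x < n := by
  obtain ⟨k, hk, hrep⟩ := List.mem_flatMap.mp hx
  rw [List.eq_of_mem_replicate hrep]
  exact List.mem_range.mp hk

theorem pv_pairwise_flat (c : Nat → Nat) :
    ∀ n : Nat, ((List.range n).flatMap (fun k => List.replicate (c k) k)).Pairwise (· ≤ ·) := by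
  intro n
  induction n with
  | zero => simp
  | succ m ih =>
    rw [List.range_succ, List.flatMap_append]
    refine List.pairwise_append.mpr ⟨ih, ?_, ?_⟩
    · simp [List.pairwise_replicate]
    · intro a ha b hb
      have h1 : a < m := pv_mem_flat c m a ha
      simp only [List.flatMap_cons, List.flatMap_nil, List.append_nil] at hb
      rw [List.eq_of_mem_replicate hb]
      omega

theorem pv_portB_eq (tab A : List Int) (h : Pre_sortowanie_przez_zliczanie tab A) :
    sortowanie_przez_zliczanie_alt tab A
      = (pvFlat tab A).map (fun k => A.getD k 0) := by
  have halt : sortowanie_przez_zliczanie_alt tab A = PySem.List.sorted tab (pvKey A) false := rfl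
  set S := PySem.List.sorted tab (pvKey A) false with hS
  have hperm : S.Perm tab := PySem.List.sorted_perm tab (pvKey A) false
  have hmemA : ∀ y ∈ S, y ∈ A := fun y hy => h y (hperm.mem_iff.mp hy)
  -- keys of S equal pvFlat
  have hkeys : S.map (pvKey A) = pvFlat tab A := by
    refine PySem.List.eq_of_perm_of_pairwise_le_of_injective (fun k : Nat => k)
      Function.injective_id ?_ ?_ ?_
    · -- S.map key ~ pvFlat
      refine ((hperm.map (pvKey A)).trans ?_)
      refine List.perm_iff_count.mpr fun a => ?_
      rw [pvFlat, pv_count_flat]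
      by_cases ha : a < A.length
      · rw [if_pos ha, List.count_eq_countP, List.countP_map, pvCnt]
        rfl
      · rw [if_neg ha, List.count_eq_zero]
        intro hmem
        obtain ⟨x, hx, hxa⟩ := List.mem_map.mp hmem
        have := (pvKey_facts A x (h x hx)).2.1
        omega
    · exact List.pairwise_map.mpr (PySem.List.sorted_pairwise tab (pvKey A))
    · exact pv_pairwise_flat _ _
  -- values of S are determined by keys
  have hvals : S = (S.map (pvKey A)).map (fun k => A.getD k 0) := by
    rw [List.map_map]
    symm
    calc S.map (fun y => A.getD (pvKey A y) 0) = S.map id :=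
          List.map_congr_left (fun y hy => (pvKey_facts A y (hmemA y hy)).2.2)
      _ = S := List.map_id S
  rw [halt, hvals, hkeys]


-- ===== VERDICT (by name: the statement is the Claim_ definition above) =====
theorem sortowanie_przez_zliczanie_spec : Claim_equal_sortowanie_przez_zliczanie := by
  intro tab A _hdom hpre
  unfold Spec_sortowanie_przez_zliczanie
  rw [pv_portA_eq tab A hpre, pv_portB_eq tab A hpre, pvFlat, List.map_flatMap]
  simp [List.map_replicate]
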